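-- pv_equiv track=rewrite | github.com/devbazy/poker-2 | poker.py | permute_draw
-- ===== SOURCE A (Python) =====
-- def permute_draw(deck, draw):
--     '''
--     Returns a list containing a list of permuted flops.
--     '''
--     # Sanity check.
--     assert(draw > 0)
--
--     # Check to see if we're at the last card drawn.
--     if draw == 1:
--         result = []
--         for card in deck:
--             result.append([card])
--         return result
--
--     # Check to see if we can still make more permutations.
--     if len(deck) < draw:
--         return []
--
--     # Run the permutation and join it with the recursive result
--     # of other permutations.
--     result = []
--     for ii in range(len(deck)):
--         # Generate the permutation for the next recursion.
--         next = permute_draw(deck[ii + 1:], draw - 1)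
--
--         # If there were no results, we can end early.
--         if len(next) == 0:
--             break
--
--         # Append the current card to the permutation.
--         for entry in next:
--             entry.append(deck[ii])
--             result.append(entry)
--
--     # Return the result.
--     return result
-- ===== SOURCE B (Python) =====
-- def permute_draw(deck, draw):
--     '''
--     Returns a list containing a list of permuted flops.
--     '''
--     assert draw > 0
--
--     def combos(xs, k):
--         # Standard head-first combinations in lexicographic index order.
--         if k == 0:
--             return [[]]
--         if len(xs) < k:
--             return []
--         x, rest = xs[0], xs[1:]
--         return [[x] + c for c in combos(rest, k - 1)] + combos(rest, k)
--
--     # A's convention places the lowest-index card last in each sublist.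
--     return [c[::-1] for c in combos(deck, draw)]
-- ===== Notes on version B (the rewrite author's own statement) =====
-- stated objective: simpler
-- what changed: Replaces A's index-loop recursion with break-on-empty and per-entry append by a standard head-first combinations recursion in lexicographic order, reversing each combination once at the end.
import Mathlib
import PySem

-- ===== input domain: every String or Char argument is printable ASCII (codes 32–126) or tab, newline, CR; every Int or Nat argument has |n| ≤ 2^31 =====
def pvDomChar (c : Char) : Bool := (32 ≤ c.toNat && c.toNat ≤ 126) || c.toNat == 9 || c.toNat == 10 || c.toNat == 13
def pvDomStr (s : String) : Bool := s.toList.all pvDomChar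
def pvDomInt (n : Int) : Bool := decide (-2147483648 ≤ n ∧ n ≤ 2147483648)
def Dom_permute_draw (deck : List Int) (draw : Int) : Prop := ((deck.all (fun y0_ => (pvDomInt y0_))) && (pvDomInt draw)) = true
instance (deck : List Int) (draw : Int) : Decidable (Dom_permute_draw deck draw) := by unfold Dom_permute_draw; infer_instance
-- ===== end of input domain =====

-- B replaces A's index-loop recursion (append current card to each recursive entry, break on empty)
-- by a standard head-first combinations recursion, reversing each combination once at the end (objective: simpler).

-- ===== PORT A =====
-- the 'for ii in range(len(deck))' loop with its break, iterating over deck[ii] / deck[ii+1:]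
mutual
def permute_draw (deck : List Int) (draw : Int) : List (List Int) :=
  if draw = 1 then
    deck.map (fun card => [card])
  else if (deck.length : Int) < draw then
    []
  else
    pdGo deck draw
  termination_by (deck.length, 1)

def pdGo (deck : List Int) (draw : Int) : List (List Int) :=
  match deck with
  | [] => []
  | card :: rest =>
      let next := permute_draw rest (draw - 1)
      if next = [] then []   -- the 'break': remaining iterations contribute nothing
      else next.map (fun entry => entry ++ [card]) ++ pdGo rest draw
  termination_by (deck.length, 0)
end

-- ===== PORT B =====
-- python B's inner helper combos(xs, k)
def pdCombos (xs : List Int) (k : Nat) : List (List Int) :=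
  if k = 0 then [[]]
  else if xs.length < k then []
  else
    match xs with
    | [] => []   -- unreachable: xs.length < k already returned
    | x :: rest => (pdCombos rest (k - 1)).map (fun c => x :: c) ++ pdCombos rest k

-- c[::-1] on a list is exactly List.reverse
def permute_draw_alt (deck : List Int) (draw : Int) : List (List Int) :=
  (pdCombos deck draw.toNat).map List.reverse

-- ===== PRECONDITION & SPEC =====
-- A (and B) assert draw > 0: on draw ≤ 0 both raise AssertionError, so those inputs are excluded.
def Pre_permute_draw (deck : List Int) (draw : Int) : Prop := 0 < draw
instance (deck : List Int) (draw : Int) : Decidable (Pre_permute_draw deck draw) := by unfold Pre_permute_draw; infer_instance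
def pvWitness_permute_draw : List Int × Int := ([1, 2, 3], 2)

def Spec_permute_draw (deck : List Int) (draw : Int) (out : List (List Int)) : Prop := out = permute_draw_alt deck draw
instance (deck : List Int) (draw : Int) (out : List (List Int)) : Decidable (Spec_permute_draw deck draw out) := by unfold Spec_permute_draw; infer_instance

-- ===== CLAIM (what is proved, stated in full; the proofs are below) =====
def Claim_equal_permute_draw : Prop := ∀ (deck : List Int) (draw : Int), Dom_permute_draw deck draw → Pre_permute_draw deck draw → Spec_permute_draw deck draw (permute_draw deck draw)

-- ===== LEMMAS AND PROOFS =====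

lemma pdCombos_eq_nil_iff : ∀ (xs : List Int) (k : Nat), pdCombos xs k = [] ↔ xs.length < k := by
  intro xs
  induction xs with
  | nil => intro k; cases k <;> simp [pdCombos]
  | cons x rest ih =>
      intro k
      cases k with
      | zero => simp [pdCombos]
      | succ k =>
          rw [pdCombos, if_neg (Nat.succ_ne_zero k)]
          by_cases h : (x :: rest).length < k + 1
          · rw [if_pos h]; exact iff_of_true rfl h
          · rw [if_neg h]
            rw [List.append_eq_nil_iff, List.map_eq_nil_iff, ih, ih]
            simp only [List.length_cons] at h ⊢
            omega

lemma pdCombos_one : ∀ (xs : List Int), pdCombos xs 1 = xs.map (fun c => [c]) := by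
  intro xs
  induction xs with
  | nil => simp [pdCombos]
  | cons x rest ih =>
      have h0 : pdCombos rest 0 = [[]] := by rw [pdCombos.eq_def]; simp
      rw [pdCombos]
      simp [h0, ih]

lemma permute_draw_main : ∀ (n : ℕ) (deck : List Int), deck.length ≤ n → ∀ (k : ℕ), 1 ≤ k →
    permute_draw deck (k : Int) = (pdCombos deck k).map List.reverse := by
  intro n
  induction n with
  | zero =>
      intro deck hlen k hk
      have hd : deck = [] := List.eq_nil_of_length_eq_zero (Nat.le_zero.mp hlen)
      subst hd
      rcases Nat.eq_or_lt_of_le hk with h1 | h1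
      · rw [permute_draw, if_pos (by exact_mod_cast h1.symm)]
        rw [← h1]
        have h0 : pdCombos ([] : List Int) 1 = [] := by rw [pdCombos.eq_def]; simp
        simp [h0]
      · have hne : ¬ ((k : Int) = 1) := by
          intro h; exact absurd (by exact_mod_cast h : k = 1) (by omega)
        rw [permute_draw, if_neg hne,
          if_pos (by exact_mod_cast (by omega : 0 < k) : (([] : List Int).length : Int) < (k : Int))]
        rw [(pdCombos_eq_nil_iff [] k).mpr (by simpa using hk)]
        simp
  | succ n ih =>
      intro deck hlen k hk
      rcases Nat.eq_or_lt_of_le hk with h1 | h1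
      · rw [permute_draw, if_pos (by exact_mod_cast h1.symm), ← h1, pdCombos_one]
        simp
      · have hkne : ¬ ((k : Int) = 1) := by
          intro h; exact absurd (by exact_mod_cast h : k = 1) (by omega)
        rw [permute_draw, if_neg hkne]
        by_cases hlt : (deck.length : Int) < (k : Int)
        · rw [if_pos hlt]
          rw [(pdCombos_eq_nil_iff deck k).mpr (by exact_mod_cast hlt)]
          simp
        · rw [if_neg hlt]
          have hge : k ≤ deck.length := by
            have := Int.not_lt.mp hlt; exact_mod_cast this
          have hcast : (k : Int) - 1 = ((k - 1 : Nat) : Int) := by omega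
          clear hlt hkne
          induction deck with
          | nil => simp at hge; omega
          | cons card rest ihd =>
              have hrl : rest.length ≤ n := by
                simp only [List.length_cons] at hlen; omega
              rw [pdGo]
              have hrec : permute_draw rest ((k : Int) - 1) =
                  (pdCombos rest (k - 1)).map List.reverse := by
                rw [hcast]; exact ih rest hrl (k - 1) (by omega)
              simp only [hrec]
              by_cases hnil : pdCombos rest (k - 1) = []
              · have h1' : rest.length < k - 1 := (pdCombos_eq_nil_iff rest (k - 1)).mp hnil
                have h2 : pdCombos (card :: rest) k = [] := by
                  apply (pdCombos_eq_nil_iff _ k).mpr; simp only [List.length_cons]; omega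
                simp [hnil, h2]
              · rw [if_neg (by simpa using hnil)]
                have hrest : pdGo rest (k : Int) = (pdCombos rest k).map List.reverse := by
                  by_cases hge' : k ≤ rest.length
                  · exact ihd (by omega) hge'
                  · have hcr : pdCombos rest k = [] :=
                      (pdCombos_eq_nil_iff rest k).mpr (by omega)
                    cases rest with
                    | nil => rw [pdGo]; simp [hcr]
                    | cons y ys =>
                        rw [pdGo]
                        have hrec2 : permute_draw ys ((k : Int) - 1) =
                            (pdCombos ys (k - 1)).map List.reverse := by
                          rw [hcast]
                          exact ih ys (by simp only [List.length_cons] at hrl; omega) (k - 1) (by omega)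
                        have hys : pdCombos ys (k - 1) = [] := by
                          apply (pdCombos_eq_nil_iff _ _).mpr
                          simp only [List.length_cons, Nat.not_le] at hge'
                          omega
                        simp [hrec2, hys, hcr]
                rw [hrest]
                have hnl : ¬ rest.length < k - 1 :=
                  fun hc => hnil ((pdCombos_eq_nil_iff rest (k - 1)).mpr hc)
                conv_rhs => rw [pdCombos]
                rw [if_neg (by omega : ¬ k = 0),
                  if_neg (by simp only [List.length_cons]; omega : ¬ (card :: rest).length < k)]
                simp [Function.comp, List.map_map]

-- ===== VERDICT (by name: the statement is the Claim_ definition above) =====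
theorem permute_draw_spec : Claim_equal_permute_draw := by
  intro deck draw _ hpre
  unfold Pre_permute_draw at hpre
  unfold Spec_permute_draw permute_draw_alt
  have hk : draw = ((draw.toNat : Nat) : Int) := by omega
  rw [hk]
  exact permute_draw_main deck.length deck (le_refl _) draw.toNat (by omega)
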